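-- pv_equiv track=rewrite | github.com/madhurparwal-grt1/Automation_jager | automation_script/container_runner.py | _deduplicate_test_outcomes
-- ===== SOURCE A (Python) =====
-- from typing import Dict, List, Tuple
--
-- def _deduplicate_test_outcomes(
--     passed: List[str], failed: List[str], skipped: List[str]
-- ) -> Tuple[List[str], List[str], List[str]]:
--     """
--     Deduplicate test results when the same test appears multiple times with different outcomes.
--
--     This happens in multi-module Maven/Gradle builds where the same integration test
--     runs in different module contexts.
--
--     Priority for conflicting outcomes:
--     1. PASSED takes highest priority (if a test passed at least once, consider it passing)
--     2. FAILED is next (if it failed but never passed, it's a real failure)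
--     3. SKIPPED is lowest (only if it was never run to completion)
--
--     This ensures stable tests aren't incorrectly marked as failing due to
--     environment issues in some module configurations.
--     """
--     # Collect all outcomes for each test
--     test_outcomes: Dict[str, set] = {}
--
--     for test in passed:
--         test_outcomes.setdefault(test, set()).add('passed')
--     for test in failed:
--         test_outcomes.setdefault(test, set()).add('failed')
--     for test in skipped:
--         test_outcomes.setdefault(test, set()).add('skipped')
--
--     # Resolve to single outcome per test
--     final_passed = []
--     final_failed = []
--     final_skipped = []
--
--     for test, outcomes in test_outcomes.items():
--         if 'passed' in outcomes:
--             # If it passed at least once, consider it passed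
--             final_passed.append(test)
--         elif 'failed' in outcomes:
--             # If it failed but never passed, it's a failure
--             final_failed.append(test)
--         else:
--             # Only skipped
--             final_skipped.append(test)
--
--     return final_passed, final_failed, final_skipped
-- ===== SOURCE B (Python) =====
-- def _deduplicate_test_outcomes(passed, failed, skipped):
--     passed_set = set(passed)
--     failed_set = set(failed)
--     final_passed = list(dict.fromkeys(passed))
--     final_failed = list(dict.fromkeys(t for t in failed if t not in passed_set))
--     final_skipped = list(dict.fromkeys(
--         t for t in skipped if t not in passed_set and t not in failed_set))
--     return final_passed, final_failed, final_skipped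
-- ===== Notes on version B (the rewrite author's own statement) =====
-- stated objective: simpler
-- what changed: Replaces the dict-of-outcome-sets plus final resolution loop with three direct order-preserving dedups: passed, failed minus passed, skipped minus passed and failed, using precomputed membership sets.
import Mathlib
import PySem

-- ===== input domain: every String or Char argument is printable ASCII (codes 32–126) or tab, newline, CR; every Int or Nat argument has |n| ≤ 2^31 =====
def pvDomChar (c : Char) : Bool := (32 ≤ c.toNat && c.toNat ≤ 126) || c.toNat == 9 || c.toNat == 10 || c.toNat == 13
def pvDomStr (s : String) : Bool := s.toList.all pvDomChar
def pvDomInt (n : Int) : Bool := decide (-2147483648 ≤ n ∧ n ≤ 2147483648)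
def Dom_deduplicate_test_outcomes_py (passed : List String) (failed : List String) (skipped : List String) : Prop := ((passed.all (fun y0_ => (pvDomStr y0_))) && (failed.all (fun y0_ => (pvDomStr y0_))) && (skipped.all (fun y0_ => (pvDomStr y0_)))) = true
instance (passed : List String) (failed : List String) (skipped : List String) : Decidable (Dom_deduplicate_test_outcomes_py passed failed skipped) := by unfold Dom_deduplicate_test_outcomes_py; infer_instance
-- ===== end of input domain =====

-- B replaces A's dict-of-outcome-sets + final resolution loop by three direct order-preserving dedups
-- (passed; failed minus passed; skipped minus passed and failed) — a simpler decomposition, same values.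


-- ===== PORT A =====
-- 'test_outcomes.setdefault(test, set()).add(lbl)' sets d[test] = d.get(test, set()) ∪ {lbl}:
-- exactly Dict.modify test ∅ (·.add lbl).
def pvAddOutcomes (lbl : String) (ts : List String)
    (d : PySem.Dict String (PySem.Set String)) : PySem.Dict String (PySem.Set String) :=
  ts.foldl (fun d test => d.modify test PySem.Set.empty (fun s => PySem.Set.add s lbl)) d

def deduplicate_test_outcomes_py (passed : List String) (failed : List String) (skipped : List String) : List String × List String × List String :=
  let test_outcomes : PySem.Dict String (PySem.Set String) :=
    pvAddOutcomes "skipped" skipped (pvAddOutcomes "failed" failed (pvAddOutcomes "passed" passed PySem.Dict.empty))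
  -- for test, outcomes in test_outcomes.items(): append to one of the three lists
  test_outcomes.items.foldl
    (fun acc p =>
      if PySem.Set.contains p.2 "passed" then (acc.1 ++ [p.1], acc.2.1, acc.2.2)
      else if PySem.Set.contains p.2 "failed" then (acc.1, acc.2.1 ++ [p.1], acc.2.2)
      else (acc.1, acc.2.1, acc.2.2 ++ [p.1]))
    ([], [], [])

-- ===== PORT B =====
def deduplicate_test_outcomes_py_alt (passed : List String) (failed : List String) (skipped : List String) : List String × List String × List String :=
  let passed_set : PySem.Set String := PySem.Set.ofList passed
  let failed_set : PySem.Set String := PySem.Set.ofList failed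
  let final_passed := PySem.List.dedup passed
  let final_failed := PySem.List.dedup (failed.filter (fun t => !(PySem.Set.contains passed_set t)))
  let final_skipped := PySem.List.dedup (skipped.filter
    (fun t => !(PySem.Set.contains passed_set t) && !(PySem.Set.contains failed_set t)))
  (final_passed, final_failed, final_skipped)

-- ===== PRECONDITION & SPEC =====
def Spec_deduplicate_test_outcomes_py (passed : List String) (failed : List String) (skipped : List String) (out : List String × List String × List String) : Prop := out = deduplicate_test_outcomes_py_alt passed failed skipped
instance (passed : List String) (failed : List String) (skipped : List String) (out : List String × List String × List String) : Decidable (Spec_deduplicate_test_outcomes_py passed failed skipped out) := by unfold Spec_deduplicate_test_outcomes_py; infer_instance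

-- ===== CLAIM (what is proved, stated in full; the proofs are below) =====
def Claim_equal_deduplicate_test_outcomes_py : Prop := ∀ (passed : List String) (failed : List String) (skipped : List String), Dom_deduplicate_test_outcomes_py passed failed skipped → Spec_deduplicate_test_outcomes_py passed failed skipped (deduplicate_test_outcomes_py passed failed skipped)

-- ===== LEMMAS AND PROOFS =====

-- L1: membership in getD after an outcome-adding pass
theorem mem_getD_pvAddOutcomes (lbl x k : String) (l : List String)
    (d : PySem.Dict String (PySem.Set String)) :
    x ∈ (pvAddOutcomes lbl l d).getD k PySem.Set.empty ↔
      x ∈ d.getD k PySem.Set.empty ∨ (x = lbl ∧ k ∈ l) := by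
  induction l generalizing d with
  | nil => simp [pvAddOutcomes]
  | cons t ts ih =>
    simp only [pvAddOutcomes, List.foldl_cons] at *
    rw [ih]
    rw [PySem.Dict.getD_modify]
    by_cases hk : k = t
    · subst hk
      simp [PySem.Set.mem_add]
      tauto
    · simp [hk]

-- L2: filter commutes with ofList (dedup)
theorem filter_ofList (q : String → Bool) (l : List String) :
    (PySem.Set.ofList l).filter q = PySem.Set.ofList (l.filter q) := by
  induction l with
  | nil => simp [PySem.Set.ofList]
  | cons x xs ih =>
    rw [PySem.Set.ofList_cons]
    by_cases hq : q x
    · rw [List.filter_cons_of_pos hq, List.filter_cons_of_pos hq, PySem.Set.ofList_cons, ← ih]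
      simp only [PySem.Set.discard, List.filter_filter]
      refine congrArg (x :: ·) ?_
      apply List.filter_congr
      intro a _
      exact Bool.and_comm _ _
    · rw [List.filter_cons_of_neg hq, List.filter_cons_of_neg hq, ← ih]
      simp [PySem.Set.discard, List.filter_filter]
      apply List.filter_congr
      intro a _
      by_cases hax : a = x
      · subst hax; simp [hq]
      · simp [hax]

-- L3: update absorbed when all new elements already present
theorem update_of_subset (s : PySem.Set String) (xs : List String)
    (h : ∀ x ∈ xs, x ∈ s) : PySem.Set.update s xs = s := by
  rw [PySem.Set.update_eq_append_filter]
  have : List.filter (fun y => !s.contains y) (PySem.Set.ofList xs) = [] := by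
    rw [List.filter_eq_nil_iff]
    intro a ha
    rw [PySem.Set.mem_ofList] at ha
    simp
    exact h a ha
  rw [this, List.append_nil]

-- L4: the resolution foldl as three filters
theorem part_foldl (L : List (String × PySem.Set String)) (a b c : List String) :
    L.foldl (fun acc p =>
      if PySem.Set.contains p.2 "passed" then (acc.1 ++ [p.1], acc.2.1, acc.2.2)
      else if PySem.Set.contains p.2 "failed" then (acc.1, acc.2.1 ++ [p.1], acc.2.2)
      else (acc.1, acc.2.1, acc.2.2 ++ [p.1])) (a, b, c) =
    (a ++ (L.filter (fun p => PySem.Set.contains p.2 "passed")).map (·.1),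
     b ++ (L.filter (fun p => !PySem.Set.contains p.2 "passed" && PySem.Set.contains p.2 "failed")).map (·.1),
     c ++ (L.filter (fun p => !PySem.Set.contains p.2 "passed" && !PySem.Set.contains p.2 "failed")).map (·.1)) := by
  induction L generalizing a b c with
  | nil => simp
  | cons p L ih =>
    rw [List.foldl_cons]
    by_cases h1 : "passed" ∈ p.2
    · rw [if_pos ((PySem.Set.contains_iff p.2 "passed").mpr h1)]
      refine (ih (a ++ [p.1]) b c).trans ?_
      simp [h1]
    · have h1b : ¬ PySem.Set.contains p.2 "passed" = true :=
        fun hc => h1 ((PySem.Set.contains_iff p.2 "passed").mp hc)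
      rw [if_neg h1b]
      by_cases h2 : "failed" ∈ p.2
      · rw [if_pos ((PySem.Set.contains_iff p.2 "failed").mpr h2)]
        refine (ih a (b ++ [p.1]) c).trans ?_
        simp [h1, h2]
      · have h2b : ¬ PySem.Set.contains p.2 "failed" = true :=
          fun hc => h2 ((PySem.Set.contains_iff p.2 "failed").mp hc)
        rw [if_neg h2b]
        refine (ih a b (c ++ [p.1])).trans ?_
        simp [h1, h2]

-- absorb duplicates that already occur on the left
theorem ofList_append_absorb (xs t : List String) (h : ∀ x ∈ t, x ∈ xs) :
    PySem.Set.ofList (xs ++ t) = PySem.Set.ofList xs := by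
  rw [PySem.Set.ofList_append]
  exact update_of_subset _ _ (fun x hx => by rw [PySem.Set.mem_ofList]; exact h x hx)

theorem main_eq (p f s : List String) :
    deduplicate_test_outcomes_py p f s = deduplicate_test_outcomes_py_alt p f s := by
  simp only [deduplicate_test_outcomes_py, deduplicate_test_outcomes_py_alt]
  rw [part_foldl]
  set D := pvAddOutcomes "skipped" s (pvAddOutcomes "failed" f (pvAddOutcomes "passed" p PySem.Dict.empty)) with hD
  have hP : ∀ k, "passed" ∈ D.getD k PySem.Set.empty ↔ k ∈ p := by
    intro k
    rw [hD, mem_getD_pvAddOutcomes, mem_getD_pvAddOutcomes, mem_getD_pvAddOutcomes]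
    simp [PySem.Dict.getD_empty, PySem.Set.empty]
  have hF : ∀ k, "failed" ∈ D.getD k PySem.Set.empty ↔ k ∈ f := by
    intro k
    rw [hD, mem_getD_pvAddOutcomes, mem_getD_pvAddOutcomes, mem_getD_pvAddOutcomes]
    simp [PySem.Dict.getD_empty, PySem.Set.empty]
  have hkeys : D.keys = PySem.Set.ofList (p ++ (f ++ s)) := by
    rw [hD]
    unfold pvAddOutcomes
    rw [PySem.Dict.keys_foldl_modify, PySem.Dict.keys_foldl_modify, PySem.Dict.keys_foldl_modify]
    rw [PySem.Dict.keys_empty, PySem.Set.update_nil_left, ← PySem.Set.ofList_append,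
      ← PySem.Set.ofList_append, List.append_assoc]
  have hnd : D.keys.Nodup := hkeys ▸ PySem.Set.nodup_ofList _
  rw [PySem.Dict.items_eq_map_keys D hnd PySem.Set.empty]
  rw [List.filter_map, List.filter_map, List.filter_map]
  rw [List.map_map, List.map_map, List.map_map]
  simp only [Function.comp_def, List.nil_append]
  have hc1 : ∀ k, (D.getD k PySem.Set.empty).contains "passed" = decide (k ∈ p) := by
    intro k; simp; exact hP k
  have hc2 : ∀ k, (D.getD k PySem.Set.empty).contains "failed" = decide (k ∈ f) := by
    intro k; simp; exact hF k
  have hop : ∀ a : String, (PySem.Set.ofList p).contains a = decide (a ∈ p) := by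
    intro a; simp [PySem.Set.mem_ofList]
  have hof : ∀ a : String, (PySem.Set.ofList f).contains a = decide (a ∈ f) := by
    intro a; simp [PySem.Set.mem_ofList]
  refine congrArg₂ Prod.mk ?_ (congrArg₂ Prod.mk ?_ ?_)
  · -- passed component
    rw [List.map_id']
    rw [List.filter_congr (fun k _ => hc1 k), hkeys, filter_ofList,
      List.filter_append, List.filter_eq_self.mpr (fun a ha => by simp [ha]),
      ofList_append_absorb _ _ (fun x hx => by simpa using (List.mem_filter.mp hx).2)]
    simp
  · -- failed component
    rw [List.map_id']
    have hcong : ∀ k, (!(D.getD k PySem.Set.empty).contains "passed" &&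
        (D.getD k PySem.Set.empty).contains "failed") = (!decide (k ∈ p) && decide (k ∈ f)) := by
      intro k; rw [hc1, hc2]
    rw [List.filter_congr (fun k _ => hcong k), hkeys, filter_ofList,
      List.filter_append, List.filter_append]
    rw [List.filter_eq_nil_iff.mpr (fun a ha => by simp [ha]), List.nil_append]
    rw [ofList_append_absorb _ _ (fun x hx => by
      have h2 := List.mem_filter.mp hx
      have hx2 := h2.2
      simp only [Bool.and_eq_true, Bool.not_eq_true', decide_eq_false_iff_not,
        decide_eq_true_eq] at hx2
      exact List.mem_filter.mpr ⟨hx2.2, by simp [hx2.1, hx2.2]⟩)]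
    have hfc : List.filter (fun k => !decide (k ∈ p) && decide (k ∈ f)) f
        = List.filter (fun t => !(PySem.Set.ofList p).contains t) f :=
      List.filter_congr (fun a ha => by simp [ha])
    rw [hfc]
    simp
  · -- skipped component
    rw [List.map_id']
    have hcong : ∀ k, (!(D.getD k PySem.Set.empty).contains "passed" &&
        !(D.getD k PySem.Set.empty).contains "failed") = (!decide (k ∈ p) && !decide (k ∈ f)) := by
      intro k; rw [hc1, hc2]
    rw [List.filter_congr (fun k _ => hcong k), hkeys, filter_ofList,
      List.filter_append, List.filter_append]
    rw [List.filter_eq_nil_iff.mpr (fun a ha => by simp [ha]), List.nil_append]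
    rw [List.filter_eq_nil_iff.mpr (fun a ha => by simp [ha]), List.nil_append]
    have hsc : List.filter (fun k => !decide (k ∈ p) && !decide (k ∈ f)) s
        = List.filter (fun t => !(PySem.Set.ofList p).contains t && !(PySem.Set.ofList f).contains t) s :=
      List.filter_congr (fun a ha => by simp)
    rw [hsc]
    simp

-- ===== VERDICT (by name: the statement is the Claim_ definition above) =====
theorem deduplicate_test_outcomes_py_spec : Claim_equal_deduplicate_test_outcomes_py := by
  intro passed failed skipped _
  unfold Spec_deduplicate_test_outcomes_py
  exact main_eq passed failed skipped
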